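-- pv_equiv track=rewrite | github.com/Moin0304/practice | Task4/odd_even_dict_3.py | odd_even_dict
-- ===== SOURCE A (Python) =====
-- def odd_even_dict(number):
--     result = {}
--
--     for i in number:
--         if i%2 == 0:
--             if 'even' in result:
--                 result['even'] += [i]
--             else:
--                 result['even'] = [i]
--         else:
--             if 'odd' in result:
--                 result['odd'] += [i]
--             else:
--                 result['odd'] = [i]
--
--     return result
-- ===== SOURCE B (Python) =====
-- def odd_even_dict(number):
--     evens = [i for i in number if i % 2 == 0]
--     odds = [i for i in number if i % 2 != 0]
--     result = {}
--     if evens: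
--         result['even'] = evens
--     if odds:
--         result['odd'] = odds
--     return result
-- ===== Notes on version B (the rewrite author's own statement) =====
-- stated objective: simpler
-- what changed: Replaces A's single incremental pass with per-element dict membership tests by a partition-then-assemble decomposition (two comprehensions, then conditional key assignment); Pre_ excludes lists whose first element is odd and which also contain an even element, where A's odd-before-even key order is an accidental dict-insertion artefact and B uses the fixed even-then-odd order.
-- outside the precondition, e.g. on odd_even_dict([1, 2]): A returns {'odd': [1], 'even': [2]}, B returns {'even': [2], 'odd': [1]}
import Mathlib
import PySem

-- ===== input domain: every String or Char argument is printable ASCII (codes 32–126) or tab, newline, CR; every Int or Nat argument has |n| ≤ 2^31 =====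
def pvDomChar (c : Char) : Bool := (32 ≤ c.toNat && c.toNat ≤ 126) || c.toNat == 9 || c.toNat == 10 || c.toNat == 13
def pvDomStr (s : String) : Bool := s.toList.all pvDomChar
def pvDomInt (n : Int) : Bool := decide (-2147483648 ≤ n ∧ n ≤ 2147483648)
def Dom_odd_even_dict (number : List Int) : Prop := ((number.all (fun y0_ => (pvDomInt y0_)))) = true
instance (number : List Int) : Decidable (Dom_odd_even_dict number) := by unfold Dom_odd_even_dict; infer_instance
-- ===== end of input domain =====

-- B replaces A's incremental dict-building pass with a partition-then-assemble decomposition (same cost, simpler).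
-- Pre_ excludes lists whose first element is odd and which also contain an even element: there A's
-- dict-insertion order puts 'odd' before 'even', an accidental artefact; B always emits 'even' first.


-- ===== PORT A =====
def oeStep (result : PySem.Dict String (List Int)) (i : Int) : PySem.Dict String (List Int) :=
  if PySem.Int.mod i 2 = 0 then
    if result.contains "even" then result.modify "even" [] (· ++ [i])
    else result.insert "even" [i]
  else
    if result.contains "odd" then result.modify "odd" [] (· ++ [i])
    else result.insert "odd" [i]

def odd_even_dict (number : List Int) : List (String × List Int) :=
  (number.foldl oeStep PySem.Dict.empty).items

-- ===== PORT B =====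
def odd_even_dict_alt (number : List Int) : List (String × List Int) :=
  let evens := number.filter (fun i => PySem.Int.mod i 2 = 0)
  let odds := number.filter (fun i => PySem.Int.mod i 2 ≠ 0)
  let result : PySem.Dict String (List Int) := PySem.Dict.empty
  let result := if evens ≠ [] then result.insert "even" evens else result
  let result := if odds ≠ [] then result.insert "odd" odds else result
  result.items

-- ===== PRECONDITION & SPEC =====
-- Pre_ excludes lists whose first element is odd but which also contain an even element: on those A
-- returns the same two key/value pairs with 'odd' inserted first, an accidental dict-order artefact.
def Pre_odd_even_dict (number : List Int) : Prop :=
  number = [] ∨ PySem.Int.mod (number.headD 0) 2 = 0 ∨ ∀ i ∈ number, PySem.Int.mod i 2 ≠ 0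
instance (number : List Int) : Decidable (Pre_odd_even_dict number) := by unfold Pre_odd_even_dict; infer_instance
def pvWitness_odd_even_dict : List Int := ([2, 3, 4])

def Spec_odd_even_dict (number : List Int) (out : List (String × List Int)) : Prop := out = odd_even_dict_alt number
instance (number : List Int) (out : List (String × List Int)) : Decidable (Spec_odd_even_dict number out) := by unfold Spec_odd_even_dict; infer_instance

-- ===== CLAIM (what is proved, stated in full; the proofs are below) =====
def Claim_equal_odd_even_dict : Prop := ∀ (number : List Int), Dom_odd_even_dict number → Pre_odd_even_dict number → Spec_odd_even_dict number (odd_even_dict number)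

-- ===== LEMMAS AND PROOFS =====

def oeEvens (l : List Int) : List Int := l.filter (fun i => decide ((2:Int) ∣ i))
def oeOdds (l : List Int) : List Int := l.filter (fun i => decide (i % 2 = 1))

lemma pm (i : Int) : PySem.Int.mod i 2 = i % 2 := by
  have := @PySem.Int.mod_eq_emod_of_pos
  exact PySem.Int.mod_eq_emod_of_pos (by norm_num)

lemma mod2_eq_zero_iff (i : Int) : PySem.Int.mod i 2 = 0 ↔ (2:Int) ∣ i := by
  rw [pm]; omega

lemma filter_evens (l : List Int) :
    l.filter (fun i => decide (PySem.Int.mod i 2 = 0)) = oeEvens l := by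
  unfold oeEvens
  apply List.filter_congr
  intro i _
  rw [pm, decide_eq_decide]
  omega

lemma filter_odds (l : List Int) :
    l.filter (fun i => decide (¬ PySem.Int.mod i 2 = 0)) = oeOdds l := by
  unfold oeOdds
  apply List.filter_congr
  intro i _
  rw [pm, decide_eq_decide]
  omega

-- once BOTH keys are present (even first), A's loop only appends to the two values
lemma foldl_both_even_first (l : List Int) (es os : List Int) :
    (l.foldl oeStep (PySem.Dict.mk [("even", es), ("odd", os)])).items
      = [("even", es ++ oeEvens l), ("odd", os ++ oeOdds l)] := by
  induction l generalizing es os with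
  | nil => simp [oeEvens, oeOdds]
  | cons i l ih =>
    by_cases h : (2:Int) ∣ i
    · have h0 : PySem.Int.mod i 2 = 0 := (mod2_eq_zero_iff i).2 h
      have h1 : ¬ i % 2 = 1 := by omega
      simp [oeStep, pm, h0, h, h1, PySem.Dict.contains, PySem.Dict.modify, PySem.Dict.getD,
        PySem.Dict.get?, PySem.Dict.insert, List.foldl_cons, ih, oeEvens, oeOdds]
    · have h0 : ¬ PySem.Int.mod i 2 = 0 := fun hc => h ((mod2_eq_zero_iff i).1 hc)
      have h1 : i % 2 = 1 := by omega
      simp [oeStep, pm, h0, h, h1, PySem.Dict.contains, PySem.Dict.modify, PySem.Dict.getD,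
        PySem.Dict.get?, PySem.Dict.insert, List.foldl_cons, ih, oeEvens, oeOdds]

-- only the 'even' key present so far
lemma foldl_even_only (l : List Int) (es : List Int) :
    (l.foldl oeStep (PySem.Dict.mk [("even", es)])).items
      = ("even", es ++ oeEvens l) :: (if oeOdds l = [] then [] else [("odd", oeOdds l)]) := by
  induction l generalizing es with
  | nil => simp [oeEvens, oeOdds]
  | cons i l ih =>
    by_cases h : (2:Int) ∣ i
    · have h0 : PySem.Int.mod i 2 = 0 := (mod2_eq_zero_iff i).2 h
      have h1 : ¬ i % 2 = 1 := by omega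
      simp [oeStep, pm, h0, h, h1, PySem.Dict.contains, PySem.Dict.modify, PySem.Dict.getD,
        PySem.Dict.get?, PySem.Dict.insert, List.foldl_cons, ih, oeEvens, oeOdds]
    · have h0 : ¬ PySem.Int.mod i 2 = 0 := fun hc => h ((mod2_eq_zero_iff i).1 hc)
      have h1 : i % 2 = 1 := by omega
      have hb := foldl_both_even_first l es [i]
      simp [oeStep, pm, h0, h, h1, PySem.Dict.contains, PySem.Dict.insert,
        List.foldl_cons, hb, oeEvens, oeOdds]

-- with only odd elements left and the 'odd' key present, the loop appends to 'odd'
lemma foldl_odd_only_allodd (l : List Int) (os : List Int)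
    (hall : ∀ i ∈ l, ¬ PySem.Int.mod i 2 = 0) :
    (l.foldl oeStep (PySem.Dict.mk [("odd", os)])).items
      = [("odd", os ++ oeOdds l)] := by
  induction l generalizing os with
  | nil => simp [oeOdds]
  | cons i l ih =>
    have h0 : ¬ PySem.Int.mod i 2 = 0 := hall i (by simp)
    have h1 : i % 2 = 1 := by
      have := (mod2_eq_zero_iff i).not.1 h0; omega
    have ih' := ih (os ++ [i]) (fun j hj => hall j (by simp [hj]))
    simp [oeStep, pm, h0, h1, PySem.Dict.contains, PySem.Dict.modify, PySem.Dict.getD,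
      PySem.Dict.get?, PySem.Dict.insert, List.foldl_cons, ih', oeOdds]

-- ===== VERDICT (by name: the statement is the Claim_ definition above) =====
theorem odd_even_dict_spec : Claim_equal_odd_even_dict := by
  intro number _ hpre
  unfold Spec_odd_even_dict odd_even_dict odd_even_dict_alt
  simp only [filter_evens, filter_odds]
  cases number with
  | nil => rfl
  | cons x xs =>
    rcases hpre with h | h | h
    · exact absurd h (by simp)
    · -- first element even
      have hx : (2:Int) ∣ x := (mod2_eq_zero_iff x).1 (by simpa using h)
      have h1 : ¬ x % 2 = 1 := by omega
      have he := foldl_even_only xs [x]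
      simp [oeStep, pm, h, hx, h1, PySem.Dict.contains, PySem.Dict.insert,
        PySem.Dict.empty, List.foldl_cons, he, oeEvens, oeOdds]
      by_cases hall : ∀ a ∈ xs, (2:Int) ∣ a
      · have hne : ¬ ∃ y ∈ xs, y % 2 = 1 := by
          rintro ⟨y, hy, hm⟩; have := hall y hy; omega
        simp [hall, hne, PySem.Dict.items]
      · have hex : ∃ y ∈ xs, y % 2 = 1 := by
          push_neg at hall
          rcases hall with ⟨y, hy, hnd⟩
          exact ⟨y, hy, by omega⟩
        simp [hall, hex, PySem.Dict.items]
    · -- all elements odd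
      have hx : ¬ PySem.Int.mod x 2 = 0 := h x (by simp)
      have h1 : x % 2 = 1 := by
        have := (mod2_eq_zero_iff x).not.1 hx; omega
      have ho := foldl_odd_only_allodd xs [x] (fun j hj => h j (by simp [hj]))
      have hev : oeEvens (x :: xs) = [] := by
        unfold oeEvens
        rw [List.filter_eq_nil_iff]
        intro a ha
        have := h a ha
        rw [pm] at this
        simpa using this
      simp [oeStep, pm, hx, h1, PySem.Dict.contains, PySem.Dict.insert,
        PySem.Dict.empty, List.foldl_cons, ho, hev, oeOdds, PySem.Dict.items]
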